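-- pv_equiv track=rewrite | github.com/vKrypto/practice-dsa | data_structures/graph/q2/test1.py | find_minimum_k
-- ===== SOURCE A (Python) =====
-- def find_minimum_k(track_length, n, spells):
--     left = 1
--     right = track_length
--
--     while left < right:
--         mid = (left + right) // 2
--
--         total_speed = 0
--         for spell_time in spells:
--             total_speed += min(mid, spell_time)
--
--         if total_speed >= track_length:
--             right = mid
--         else:
--             left = mid + 1
--
--     return left
-- ===== SOURCE B (Python) =====
-- def find_minimum_k(track_length, n, spells):
--     # Sort the spells once and precompute prefix sums, so each binary-search
--     # step costs O(log n) (an inner bisection) instead of an O(n) rescan.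
--     ss = sorted(spells)
--     m = len(ss)
--     pre = [0]
--     for s in ss:
--         pre.append(pre[-1] + s)
--
--     left = 1
--     right = track_length
--     while left < right:
--         mid = (left + right) // 2
--         # hand-written bisect_right: lo = number of spells <= mid
--         lo, hi = 0, m
--         while lo < hi:
--             j = (lo + hi) // 2
--             if ss[j] <= mid:
--                 lo = j + 1
--             else:
--                 hi = j
--         if pre[lo] + (m - lo) * mid >= track_length:
--             right = mid
--         else:
--             left = mid + 1
--     return left
-- ===== Notes on version B (the rewrite author's own statement) =====
-- stated objective: faster
-- what changed: Instead of rescanning all spells to compute the coverage sum at every binary-search step, B sorts the spells once and builds prefix sums, then evaluates each step with an inner bisection plus a closed-form prefix+count formula.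
import Mathlib
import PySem

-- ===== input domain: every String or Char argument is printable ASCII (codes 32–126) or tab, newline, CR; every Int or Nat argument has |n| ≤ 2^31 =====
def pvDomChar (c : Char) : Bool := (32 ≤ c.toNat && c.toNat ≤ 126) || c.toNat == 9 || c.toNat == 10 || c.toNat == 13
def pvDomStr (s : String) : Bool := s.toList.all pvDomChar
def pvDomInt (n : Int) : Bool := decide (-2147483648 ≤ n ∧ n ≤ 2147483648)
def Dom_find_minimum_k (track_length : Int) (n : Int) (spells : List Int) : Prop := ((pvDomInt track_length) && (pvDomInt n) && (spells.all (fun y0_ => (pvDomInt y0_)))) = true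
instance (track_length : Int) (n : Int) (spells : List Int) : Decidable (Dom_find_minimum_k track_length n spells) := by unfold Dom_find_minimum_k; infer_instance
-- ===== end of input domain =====

-- B sorts the spells once and uses prefix sums + an inner bisection per binary-search
-- step instead of A's O(n) rescan of the spell list at every step (objective: faster).


-- ===== PORT A =====
-- A's while-loop: binary search on k ∈ [1, track_length], rescanning `spells` each step.
def goA (track_length : Int) (spells : List Int) (left right : Int) : Int :=
  if _h : left < right then
    let mid := PySem.Int.floordiv (left + right) 2
    let total_speed := spells.foldl (fun acc spell_time => acc + min mid spell_time) 0
    if total_speed ≥ track_length then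
      goA track_length spells left mid
    else
      goA track_length spells (mid + 1) right
  else left
termination_by (right - left).toNat
decreasing_by
  · have h2 : PySem.Int.floordiv (left + right) 2 = (left + right) / 2 :=
      PySem.Int.floordiv_eq_ediv_of_pos (by norm_num)
    simp only [h2]; omega
  · have h2 : PySem.Int.floordiv (left + right) 2 = (left + right) / 2 :=
      PySem.Int.floordiv_eq_ediv_of_pos (by norm_num)
    simp only [h2]; omega

def find_minimum_k (track_length : Int) (n : Int) (spells : List Int) : Int :=
  goA track_length spells 1 track_length

-- ===== PORT B =====
-- pre = [0]; for s in ss: pre.append(pre[-1] + s)   (prefix sums of the sorted list)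
def preSums (acc : Int) : List Int → List Int
  | [] => [acc]
  | s :: rest => acc :: preSums (acc + s) rest

-- hand-written bisect_right loop of Source B, step for step (ss[j] is in range whenever
-- 0 ≤ lo < hi ≤ len ss, so pyGetD's default is never consulted on B's own calls)
def bisB (ss : List Int) (k : Int) (lo hi : Int) : Int :=
  if _h : lo < hi then
    let j := PySem.Int.floordiv (lo + hi) 2
    if PySem.List.pyGetD ss j 0 ≤ k then bisB ss k (j + 1) hi
    else bisB ss k lo j
  else lo
termination_by (hi - lo).toNat
decreasing_by
  · have h2 : PySem.Int.floordiv (lo + hi) 2 = (lo + hi) / 2 :=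
      PySem.Int.floordiv_eq_ediv_of_pos (by norm_num)
    simp only [h2]; omega
  · have h2 : PySem.Int.floordiv (lo + hi) 2 = (lo + hi) / 2 :=
      PySem.Int.floordiv_eq_ediv_of_pos (by norm_num)
    simp only [h2]; omega

-- outer while-loop of Source B: same binary search on k, but each step evaluates the
-- coverage via the inner bisection and the prefix-sum formula
def goB (track_length : Int) (ss pre : List Int) (m : Int) (left right : Int) : Int :=
  if _h : left < right then
    let mid := PySem.Int.floordiv (left + right) 2
    let lo := bisB ss mid 0 m
    if PySem.List.pyGetD pre lo 0 + (m - lo) * mid ≥ track_length then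
      goB track_length ss pre m left mid
    else
      goB track_length ss pre m (mid + 1) right
  else left
termination_by (right - left).toNat
decreasing_by
  · have h2 : PySem.Int.floordiv (left + right) 2 = (left + right) / 2 :=
      PySem.Int.floordiv_eq_ediv_of_pos (by norm_num)
    simp only [h2]; omega
  · have h2 : PySem.Int.floordiv (left + right) 2 = (left + right) / 2 :=
      PySem.Int.floordiv_eq_ediv_of_pos (by norm_num)
    simp only [h2]; omega

def find_minimum_k_alt (track_length : Int) (n : Int) (spells : List Int) : Int :=
  let ss := PySem.List.sorted spells (fun x => x)
  let m : Int := ss.length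
  let pre := preSums 0 ss
  goB track_length ss pre m 1 track_length

-- ===== PRECONDITION & SPEC =====
def Spec_find_minimum_k (track_length : Int) (n : Int) (spells : List Int) (out : Int) : Prop := out = find_minimum_k_alt track_length n spells
instance (track_length : Int) (n : Int) (spells : List Int) (out : Int) : Decidable (Spec_find_minimum_k track_length n spells out) := by unfold Spec_find_minimum_k; infer_instance

-- ===== CLAIM (what is proved, stated in full; the proofs are below) =====
def Claim_equal_find_minimum_k : Prop := ∀ (track_length : Int) (n : Int) (spells : List Int), Dom_find_minimum_k track_length n spells → Spec_find_minimum_k track_length n spells (find_minimum_k track_length n spells)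

-- ===== LEMMAS AND PROOFS =====

-- the inner bisection returns a splitting index of the sorted list around k
lemma bisB_spec (spells : List Int) (k : Int) :
    ∀ (t : Nat) (lo hi : Int), (hi - lo).toNat = t →
    0 ≤ lo → lo ≤ hi → hi ≤ ((PySem.List.sorted spells (fun x => x)).length : Int) →
    (∀ j : Nat, (j : Int) < lo → ∀ hj : j < (PySem.List.sorted spells (fun x => x)).length,
        (PySem.List.sorted spells (fun x => x))[j] ≤ k) →
    (∀ j : Nat, hi ≤ (j : Int) → ∀ hj : j < (PySem.List.sorted spells (fun x => x)).length,
        k < (PySem.List.sorted spells (fun x => x))[j]) →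
    (lo ≤ bisB (PySem.List.sorted spells (fun x => x)) k lo hi ∧
     bisB (PySem.List.sorted spells (fun x => x)) k lo hi ≤ hi ∧
     (∀ j : Nat, (j : Int) < bisB (PySem.List.sorted spells (fun x => x)) k lo hi →
        ∀ hj : j < (PySem.List.sorted spells (fun x => x)).length,
        (PySem.List.sorted spells (fun x => x))[j] ≤ k) ∧
     (∀ j : Nat, bisB (PySem.List.sorted spells (fun x => x)) k lo hi ≤ (j : Int) →
        ∀ hj : j < (PySem.List.sorted spells (fun x => x)).length,
        k < (PySem.List.sorted spells (fun x => x))[j])) := by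
  intro t
  induction t using Nat.strong_induction_on with
  | _ t ih =>
    intro lo hi ht h0 hlh hhi hbelow habove
    rw [bisB]
    by_cases h : lo < hi
    · simp only [dif_pos h]
      have h2 : PySem.Int.floordiv (lo + hi) 2 = (lo + hi) / 2 :=
        PySem.Int.floordiv_eq_ediv_of_pos (by norm_num)
      have hj0 : (0:Int) ≤ PySem.Int.floordiv (lo + hi) 2 := by rw [h2]; omega
      have hjlt : PySem.Int.floordiv (lo + hi) 2 < ((PySem.List.sorted spells (fun x => x)).length : Int) := by
        rw [h2]; omega
      have hjlo : lo ≤ PySem.Int.floordiv (lo + hi) 2 := by rw [h2]; omega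
      have hjhi : PySem.Int.floordiv (lo + hi) 2 < hi := by rw [h2]; omega
      rw [PySem.List.pyGetD_eq_getElem _ 0 hj0 hjlt]
      split_ifs with hcond
      · obtain ⟨c1, c2, c3, c4⟩ := ih (hi - (PySem.Int.floordiv (lo + hi) 2 + 1)).toNat
          (by rw [h2] at *; omega) (PySem.Int.floordiv (lo + hi) 2 + 1) hi rfl
          (by omega) (by omega) hhi
          (by
            intro jq hjq hjl
            have hmono := PySem.List.sorted_id_getElem_mono spells
              (p := jq) (q := (PySem.Int.floordiv (lo + hi) 2).toNat)
              (by omega) (by omega)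
            exact le_trans hmono hcond)
          habove
        exact ⟨by omega, c2, c3, c4⟩
      · obtain ⟨c1, c2, c3, c4⟩ := ih (PySem.Int.floordiv (lo + hi) 2 - lo).toNat
          (by rw [h2] at *; omega) lo (PySem.Int.floordiv (lo + hi) 2) rfl
          h0 hjlo (by omega) hbelow
          (by
            intro jq hjq hjl
            have hmono := PySem.List.sorted_id_getElem_mono spells
              (p := (PySem.Int.floordiv (lo + hi) 2).toNat) (q := jq)
              (by omega) hjl
            exact lt_of_lt_of_le (by omega) hmono)
        exact ⟨c1, by omega, c3, c4⟩
    · simp only [dif_neg h]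
      exact ⟨le_refl lo, by omega, hbelow, fun jq hjq => habove jq (by omega)⟩

lemma preSums_length : ∀ (l : List Int) (acc : Int), (preSums acc l).length = l.length + 1
  | [], _ => rfl
  | s :: rest, acc => by simp [preSums, preSums_length rest (acc + s)]

lemma preSums_getD : ∀ (l : List Int) (acc : Int) (t : Nat), t ≤ l.length →
    (preSums acc l).getD t 0 = acc + (l.take t).sum
  | [], acc, 0, _ => by simp [preSums]
  | s :: rest, acc, 0, _ => by simp [preSums]
  | s :: rest, acc, t + 1, h => by
      simp only [preSums, List.getD_cons_succ, List.take_succ_cons, List.sum_cons]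
      rw [preSums_getD rest (acc + s) t (by simpa using h)]
      ring

-- coverage formula of B equals A's rescan sum
lemma cov_eq (spells : List Int) (k : Int) :
    PySem.List.pyGetD (preSums 0 (PySem.List.sorted spells (fun x => x)))
        (bisB (PySem.List.sorted spells (fun x => x)) k 0 ((PySem.List.sorted spells (fun x => x)).length : Int)) 0
      + (((PySem.List.sorted spells (fun x => x)).length : Int)
          - bisB (PySem.List.sorted spells (fun x => x)) k 0 ((PySem.List.sorted spells (fun x => x)).length : Int)) * k
      = spells.foldl (fun acc s => acc + min k s) 0 := by
  obtain ⟨h0i, him, hlek, hgtk⟩ := bisB_spec spells k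
    ((((PySem.List.sorted spells (fun x => x)).length : Int) - 0).toNat) 0
    ((PySem.List.sorted spells (fun x => x)).length : Int) rfl (le_refl 0)
    (by positivity) (le_refl _)
    (by intro jq hjq _; exfalso; omega)
    (by intro jq hjq hjl; exfalso; omega)
  set ss := PySem.List.sorted spells (fun x => x) with hss
  set i := bisB ss k 0 ((ss.length : Int)) with hidef
  have hcast : i = ((i.toNat : Nat) : Int) := by omega
  rw [hcast, PySem.List.pyGetD_natCast,
      preSums_getD ss 0 i.toNat (by omega),
      PySem.List.foldl_add spells (fun s => min k s) 0]
  have hperm : (spells.map (fun s => min k s)).sum = (ss.map (fun s => min k s)).sum :=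
    (((PySem.List.sorted_perm spells (fun x => x) false).map (fun s => min k s)).sum_eq).symm
  rw [hperm]
  have htake : ∀ x ∈ ss.take i.toNat, min k x = x := by
    intro x hx
    obtain ⟨jq, hjlen, rfl⟩ := List.mem_iff_getElem.mp hx
    rw [List.getElem_take]
    have hjlen' : jq < ss.length := by
      have := hjlen; rw [List.length_take] at this; omega
    exact min_eq_right (hlek jq (by have := hjlen; rw [List.length_take] at this; omega) hjlen')
  have hdrop : ∀ x ∈ ss.drop i.toNat, min k x = k := by
    intro x hx
    obtain ⟨jq, hjlen, rfl⟩ := List.mem_iff_getElem.mp hx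
    rw [List.getElem_drop]
    have hjlen' : i.toNat + jq < ss.length := by
      have := hjlen; rw [List.length_drop] at this; omega
    exact min_eq_left (le_of_lt (hgtk (i.toNat + jq) (by omega) hjlen'))
  have hsplit : (ss.map (fun s => min k s)).sum
      = (ss.take i.toNat).sum + ((ss.length - i.toNat : Nat) : Int) * k := by
    conv_lhs => rw [← List.take_append_drop i.toNat ss]
    rw [List.map_append, List.sum_append]
    congr 1
    · rw [List.map_congr_left htake]; simp
    · rw [List.map_congr_left (g := fun _ => k) hdrop, List.map_const',
          List.sum_replicate, List.length_drop]
      simp [nsmul_eq_mul]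
  rw [hsplit]
  have hc : ((ss.length - i.toNat : Nat) : Int) = (ss.length : Int) - i := by omega
  rw [hc, ← hcast]
  ring

lemma goB_eq_goA (track_length : Int) (spells : List Int) :
    ∀ (t : Nat) (l r : Int), (r - l).toNat = t →
    goB track_length (PySem.List.sorted spells (fun x => x))
        (preSums 0 (PySem.List.sorted spells (fun x => x)))
        ((PySem.List.sorted spells (fun x => x)).length : Int) l r
      = goA track_length spells l r := by
  intro t
  induction t using Nat.strong_induction_on with
  | _ t ih =>
    intro l r ht
    rw [goA, goB]
    by_cases hlr : l < r
    · simp only [dif_pos hlr]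
      have h2 : PySem.Int.floordiv (l + r) 2 = (l + r) / 2 :=
        PySem.Int.floordiv_eq_ediv_of_pos (by norm_num)
      rw [cov_eq spells (PySem.Int.floordiv (l + r) 2)]
      split_ifs with hc
      · exact ih ((PySem.Int.floordiv (l + r) 2 - l).toNat) (by rw [h2] at *; omega) l _ rfl
      · exact ih ((r - (PySem.Int.floordiv (l + r) 2 + 1)).toNat) (by rw [h2] at *; omega) _ r rfl
    · simp only [dif_neg hlr]

-- ===== VERDICT (by name: the statement is the Claim_ definition above) =====
theorem find_minimum_k_spec : Claim_equal_find_minimum_k := by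
  intro track_length n spells _
  unfold Spec_find_minimum_k find_minimum_k find_minimum_k_alt
  exact (goB_eq_goA track_length spells _ 1 track_length rfl).symm
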